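-- pv_equiv track=rewrite | github.com/saitej13sai/medical-underwriting-assignment | rules/rules_engine.py | overall_risk
-- ===== SOURCE A (Python) =====
-- def overall_risk(flags, diagnoses):
--     """
--     Diagnosis-aware risk calculation.
--     Explicit diagnoses override lab-based risk.
--     """
--
--     # 🔴 Diagnosis override (critical underwriting rule)
--     if diagnoses.get("explicit"):
--         return "high"
--
--     if any(f["risk"] in ["High", "Diabetes", "HighStage2"] for f in flags):
--         return "high"
--     if any(f["risk"] in ["Borderline", "Prediabetes", "HighStage1"] for f in flags):
--         return "medium"
--     return "low"
-- ===== SOURCE B (Python) =====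
-- _SEV = {"High": 2, "Diabetes": 2, "HighStage2": 2,
--         "Borderline": 1, "Prediabetes": 1, "HighStage1": 1}
--
-- def overall_risk(flags, diagnoses):
--     if diagnoses.get("explicit"):
--         return "high"
--     level = 0
--     for f in flags:
--         level = max(level, _SEV.get(f["risk"], 0))
--         if level == 2:
--             break
--     return ("low", "medium", "high")[level]
-- ===== Notes on version B (the rewrite author's own statement) =====
-- stated objective: alternative
-- what changed: Replaces A's two ordered any()-membership scans over the flag list with a single pass that max-reduces a severity level via a severity table (with early exit at the top level) and decodes the level into a label at the end.
import Mathlib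
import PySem

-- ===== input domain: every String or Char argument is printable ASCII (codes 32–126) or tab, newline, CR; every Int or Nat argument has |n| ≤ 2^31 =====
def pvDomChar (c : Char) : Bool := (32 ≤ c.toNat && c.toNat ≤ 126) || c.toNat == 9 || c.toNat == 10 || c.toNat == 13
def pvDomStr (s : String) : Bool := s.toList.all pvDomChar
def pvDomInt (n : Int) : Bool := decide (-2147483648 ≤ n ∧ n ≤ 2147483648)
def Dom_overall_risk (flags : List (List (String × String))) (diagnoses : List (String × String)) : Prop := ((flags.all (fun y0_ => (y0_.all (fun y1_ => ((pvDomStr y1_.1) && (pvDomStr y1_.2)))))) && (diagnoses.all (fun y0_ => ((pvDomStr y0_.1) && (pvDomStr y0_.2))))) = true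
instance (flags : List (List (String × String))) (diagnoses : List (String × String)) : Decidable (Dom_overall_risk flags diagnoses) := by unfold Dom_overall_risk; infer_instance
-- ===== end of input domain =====

-- B replaces A's two ordered any()-membership scans with one severity-table max-reduction pass
-- (early exit at the top level) decoded into a label at the end; alternative decomposition, same cost.


-- ===== PORT A =====
-- f["risk"]; the KeyError case (lookup = none) is excluded by Pre_overall_risk, "" is a total default
def pvRiskA (f : List (String × String)) : String :=
  ((PySem.Dict.mk f).get? "risk").getD ""

-- diagnoses.get("explicit") is truthy iff present with a nonempty string value
def pvExplicitTruthy (diagnoses : List (String × String)) : Bool :=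
  ((PySem.Dict.mk diagnoses).get? "explicit").getD "" != ""

def overall_risk (flags : List (List (String × String))) (diagnoses : List (String × String)) : String :=
  if pvExplicitTruthy diagnoses then "high"
  else if flags.any (fun f => ["High", "Diabetes", "HighStage2"].contains (pvRiskA f)) then "high"
  else if flags.any (fun f => ["Borderline", "Prediabetes", "HighStage1"].contains (pvRiskA f)) then "medium"
  else "low"

-- ===== PORT B =====
def pvSevTable : PySem.Dict String Int :=
  PySem.Dict.mk [("High", 2), ("Diabetes", 2), ("HighStage2", 2),
                 ("Borderline", 1), ("Prediabetes", 1), ("HighStage1", 1)]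

-- the for-loop of Source B with its early break at level 2
def pvLoopB : List (List (String × String)) → Int → Int
  | [], level => level
  | f :: rest, level =>
    let level' := max level (pvSevTable.getD (((PySem.Dict.mk f).get? "risk").getD "") 0)
    if level' == 2 then level' else pvLoopB rest level'

def overall_risk_alt (flags : List (List (String × String))) (diagnoses : List (String × String)) : String :=
  if ((PySem.Dict.mk diagnoses).get? "explicit").getD "" != "" then "high"
  else
    let level := pvLoopB flags 0
    if level == 2 then "high" else if level == 1 then "medium" else "low"

-- ===== PRECONDITION & SPEC =====
-- Pre_ excludes exactly the inputs where Python A raises KeyError: no explicit diagnosis and some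
-- flag dict lacking the key "risk" is reached (i.e. not preceded by a high-severity flag).
def Pre_overall_risk (flags : List (List (String × String))) (diagnoses : List (String × String)) : Prop :=
  pvExplicitTruthy diagnoses = true ∨
  ∀ i < flags.length, ((PySem.Dict.mk (flags.getD i [])).get? "risk").isSome = false →
    ∃ j < i, ["High", "Diabetes", "HighStage2"].contains (pvRiskA (flags.getD j [])) = true
instance (flags : List (List (String × String))) (diagnoses : List (String × String)) : Decidable (Pre_overall_risk flags diagnoses) := by unfold Pre_overall_risk; infer_instance

def pvWitness_overall_risk : (List (List (String × String))) × (List (String × String)) :=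
  ([[("risk", "Borderline")]], [("note", "ok")])

def Spec_overall_risk (flags : List (List (String × String))) (diagnoses : List (String × String)) (out : String) : Prop := out = overall_risk_alt flags diagnoses
instance (flags : List (List (String × String))) (diagnoses : List (String × String)) (out : String) : Decidable (Spec_overall_risk flags diagnoses out) := by unfold Spec_overall_risk; infer_instance

-- ===== CLAIM (what is proved, stated in full; the proofs are below) =====
def Claim_equal_overall_risk : Prop := ∀ (flags : List (List (String × String))) (diagnoses : List (String × String)), Dom_overall_risk flags diagnoses → Pre_overall_risk flags diagnoses → Spec_overall_risk flags diagnoses (overall_risk flags diagnoses)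

-- ===== LEMMAS AND PROOFS =====

def pvSev (s : String) : Int := pvSevTable.getD s 0

lemma pvSev_spec (s : String) :
    pvSev s = (if ["High", "Diabetes", "HighStage2"].contains s then 2
               else if ["Borderline", "Prediabetes", "HighStage1"].contains s then 1 else 0) := by
  by_cases h1 : s = "High"; · subst h1; decide
  by_cases h2 : s = "Diabetes"; · subst h2; decide
  by_cases h3 : s = "HighStage2"; · subst h3; decide
  by_cases h4 : s = "Borderline"; · subst h4; decide
  by_cases h5 : s = "Prediabetes"; · subst h5; decide
  by_cases h6 : s = "HighStage1"; · subst h6; decide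
  have e1 : ("High" == s) = false := by simp [beq_iff_eq]; exact fun h => h1 h.symm
  have e2 : ("Diabetes" == s) = false := by simp [beq_iff_eq]; exact fun h => h2 h.symm
  have e3 : ("HighStage2" == s) = false := by simp [beq_iff_eq]; exact fun h => h3 h.symm
  have e4 : ("Borderline" == s) = false := by simp [beq_iff_eq]; exact fun h => h4 h.symm
  have e5 : ("Prediabetes" == s) = false := by simp [beq_iff_eq]; exact fun h => h5 h.symm
  have e6 : ("HighStage1" == s) = false := by simp [beq_iff_eq]; exact fun h => h6 h.symm
  simp [pvSev, pvSevTable, PySem.Dict.getD_eq_get?_getD, PySem.Dict.get?_mk_cons,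
        PySem.Dict.get?, e1, e2, e3, e4, e5, e6, h1, h2, h3, h4, h5, h6]

lemma pvLoopB_eq (flags : List (List (String × String))) (l : Int) (h0 : 0 ≤ l) (h2 : l ≤ 2) :
    pvLoopB flags l =
      max l (if flags.any (fun f => ["High", "Diabetes", "HighStage2"].contains (pvRiskA f)) then 2
             else if flags.any (fun f => ["Borderline", "Prediabetes", "HighStage1"].contains (pvRiskA f)) then 1
             else 0) := by
  induction flags generalizing l with
  | nil => simp [pvLoopB]; omega
  | cons f rest ih =>
    have hs := pvSev_spec (pvRiskA f)
    show (if (max l (pvSev (pvRiskA f)) == 2) = true then max l (pvSev (pvRiskA f))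
          else pvLoopB rest (max l (pvSev (pvRiskA f)))) = _
    simp only [List.any_cons, Bool.or_eq_true]
    by_cases hH : (["High", "Diabetes", "HighStage2"].contains (pvRiskA f)) = true
    · have hs2 : pvSev (pvRiskA f) = 2 := by rw [hs, if_pos hH]
      rw [hs2, if_pos (show ((max l 2 == 2) = true) by simp only [beq_iff_eq]; omega)]
      rw [if_pos (Or.inl hH)]
    · by_cases hM : (["Borderline", "Prediabetes", "HighStage1"].contains (pvRiskA f)) = true
      · have hs1 : pvSev (pvRiskA f) = 1 := by rw [hs, if_neg hH, if_pos hM]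
        rw [hs1]
        by_cases hl : l = 2
        · rw [if_pos (show ((max l 1 == 2) = true) by simp only [beq_iff_eq]; omega)]
          split_ifs <;> omega
        · rw [if_neg (show ¬ ((max l 1 == 2) = true) by simp only [beq_iff_eq]; omega)]
          rw [ih (max l 1) (by omega) (by omega)]
          by_cases hrH : rest.any (fun f => ["High", "Diabetes", "HighStage2"].contains (pvRiskA f)) = true
          · rw [if_pos hrH, if_pos (show (["High", "Diabetes", "HighStage2"].contains (pvRiskA f) = true ∨ rest.any (fun f => ["High", "Diabetes", "HighStage2"].contains (pvRiskA f)) = true) from Or.inr hrH)]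
            all_goals omega
          · rw [if_neg hrH, if_neg (show ¬ (["High", "Diabetes", "HighStage2"].contains (pvRiskA f) = true ∨ rest.any (fun f => ["High", "Diabetes", "HighStage2"].contains (pvRiskA f)) = true) from by tauto), if_pos (Or.inl hM)]
            by_cases hrM : rest.any (fun f => ["Borderline", "Prediabetes", "HighStage1"].contains (pvRiskA f)) = true
            · rw [if_pos hrM]; all_goals omega
            · rw [if_neg hrM]; all_goals omega
      · have hs0 : pvSev (pvRiskA f) = 0 := by rw [hs, if_neg hH, if_neg hM]
        rw [hs0, show max l 0 = l from by omega]
        by_cases hl : l = 2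
        · rw [if_pos (show ((l == 2) = true) by simp only [beq_iff_eq]; omega)]
          split_ifs <;> omega
        · rw [if_neg (show ¬ ((l == 2) = true) by simp only [beq_iff_eq]; omega)]
          rw [ih l h0 h2]
          by_cases hrH : rest.any (fun f => ["High", "Diabetes", "HighStage2"].contains (pvRiskA f)) = true
          · rw [if_pos hrH, if_pos (show (["High", "Diabetes", "HighStage2"].contains (pvRiskA f) = true ∨ rest.any (fun f => ["High", "Diabetes", "HighStage2"].contains (pvRiskA f)) = true) from Or.inr hrH)]
          · rw [if_neg hrH, if_neg (show ¬ (["High", "Diabetes", "HighStage2"].contains (pvRiskA f) = true ∨ rest.any (fun f => ["High", "Diabetes", "HighStage2"].contains (pvRiskA f)) = true) from by tauto)]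
            by_cases hrM : rest.any (fun f => ["Borderline", "Prediabetes", "HighStage1"].contains (pvRiskA f)) = true
            · rw [if_pos hrM, if_pos (show (["Borderline", "Prediabetes", "HighStage1"].contains (pvRiskA f) = true ∨ rest.any (fun f => ["Borderline", "Prediabetes", "HighStage1"].contains (pvRiskA f)) = true) from Or.inr hrM)]
            · rw [if_neg hrM, if_neg (show ¬ (["Borderline", "Prediabetes", "HighStage1"].contains (pvRiskA f) = true ∨ rest.any (fun f => ["Borderline", "Prediabetes", "HighStage1"].contains (pvRiskA f)) = true) from by tauto)]

-- ===== VERDICT (by name: the statement is the Claim_ definition above) =====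
theorem overall_risk_spec : Claim_equal_overall_risk := by
  intro flags diagnoses _ _
  unfold Spec_overall_risk overall_risk overall_risk_alt pvExplicitTruthy
  by_cases he : ((((PySem.Dict.mk diagnoses).get? "explicit").getD "" != "") = true)
  · rw [if_pos he, if_pos he]
  · rw [if_neg he, if_neg he]
    simp only [pvLoopB_eq flags 0 le_rfl (by norm_num)]
    by_cases hH : flags.any (fun f => ["High", "Diabetes", "HighStage2"].contains (pvRiskA f)) = true
    · rw [if_pos hH, if_pos hH]
      norm_num
    · rw [if_neg hH, if_neg hH]
      by_cases hM : flags.any (fun f => ["Borderline", "Prediabetes", "HighStage1"].contains (pvRiskA f)) = true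
      · rw [if_pos hM, if_pos hM]
        norm_num
      · rw [if_neg hM, if_neg hM]
        norm_num
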